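-- pv_equiv track=rewrite | github.com/GouravYadavv/GFG_problems | Medium/Find duplicate rows in a binary matrix/find-duplicate-rows-in-a-binary-matrix.py | repeatedRows
-- ===== SOURCE A (Python) =====
-- def repeatedRows(arr, m ,n):
--     #code here
--     st = set()
--     ans = []
--     ind = 0
--
--     for i in arr:
--         curr = tuple(i)
--         if curr in st: ans.append(ind)
--         else: st.add(curr)
--         ind += 1
--
--     return ans
-- ===== SOURCE B (Python) =====
-- def repeatedRows(arr, m, n):
--     # Group the indices of each distinct row, then every index after the
--     # first in a group is a duplicate; collect them and sort.
--     groups = {}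
--     for i, row in enumerate(arr):
--         key = tuple(row)
--         groups[key] = groups.get(key, []) + [i]
--     out = []
--     for g in groups.values():
--         out += g[1:]
--     return sorted(out)
-- ===== Notes on version B (the rewrite author's own statement) =====
-- stated objective: alternative
-- what changed: Replaces the streaming seen-set pass with a group-by: build a dict from each row to the list of all its occurrence indices, drop the first index of every group, concatenate and sort.
import Mathlib
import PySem

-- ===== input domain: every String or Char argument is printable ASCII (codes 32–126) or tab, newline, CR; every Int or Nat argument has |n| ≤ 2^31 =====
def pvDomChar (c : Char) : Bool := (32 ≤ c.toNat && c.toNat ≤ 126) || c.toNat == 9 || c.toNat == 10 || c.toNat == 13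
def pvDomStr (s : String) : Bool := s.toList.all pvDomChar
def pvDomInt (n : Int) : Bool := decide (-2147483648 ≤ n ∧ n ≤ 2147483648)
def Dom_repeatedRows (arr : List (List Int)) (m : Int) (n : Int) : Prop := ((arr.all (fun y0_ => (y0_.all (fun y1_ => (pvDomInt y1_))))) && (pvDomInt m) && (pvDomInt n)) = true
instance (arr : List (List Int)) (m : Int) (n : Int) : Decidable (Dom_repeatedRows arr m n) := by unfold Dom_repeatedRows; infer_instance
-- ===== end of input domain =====

-- B replaces A's streaming seen-set pass by a group-by: a dict from each row to all its
-- occurrence indices, then every index after the first of a group is collected and sorted.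

-- ===== PORT A =====
-- literal port: st = set(); ans = []; ind = 0; for i in arr: …
def repeatedRows (arr : List (List Int)) (m : Int) (n : Int) : List Int :=
  (arr.foldl
    (fun (s : PySem.Set (List Int) × List Int × Int) i =>
      let curr := i
      if PySem.Set.contains s.1 curr then (s.1, s.2.1 ++ [s.2.2], s.2.2 + 1)
      else (PySem.Set.add s.1 curr, s.2.1, s.2.2 + 1))
    (PySem.Set.empty, ([] : List Int), (0 : Int))).2.1

-- ===== PORT B =====
-- groups = {}; for i, row in enumerate(arr): groups[key] = groups.get(key, []) + [i]
-- out = []; for g in groups.values(): out += g[1:]; return sorted(out)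
def repeatedRows_alt (arr : List (List Int)) (m : Int) (n : Int) : List Int :=
  let groups := (PySem.List.enumerate arr).foldl
      (fun (d : PySem.Dict (List Int) (List Int)) p => d.modify p.2 [] (· ++ [p.1]))
      PySem.Dict.empty
  let out := groups.values.foldl
      (fun acc g => acc ++ PySem.List.slice g (some 1) none) []
  PySem.List.sorted out (fun x => x) false

-- ===== PRECONDITION & SPEC =====
def Spec_repeatedRows (arr : List (List Int)) (m : Int) (n : Int) (out : List Int) : Prop := out = repeatedRows_alt arr m n
instance (arr : List (List Int)) (m : Int) (n : Int) (out : List Int) : Decidable (Spec_repeatedRows arr m n out) := by unfold Spec_repeatedRows; infer_instance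

-- ===== CLAIM (what is proved, stated in full; the proofs are below) =====
def Claim_equal_repeatedRows : Prop := ∀ (arr : List (List Int)) (m : Int) (n : Int), Dom_repeatedRows arr m n → Spec_repeatedRows arr m n (repeatedRows arr m n)

-- ===== LEMMAS AND PROOFS =====

-- common specification: duplicates of l relative to an already-seen prefix pref
def dupSpec : List (List Int) → List (List Int) → List Int
  | [], _ => []
  | x :: l, pref =>
      (if x ∈ pref then [((pref.length : Nat) : Int)] else []) ++ dupSpec l (pref ++ [x])

-- indices (as produced by enumerate) at which row r occurs in arr
def occ (arr : List (List Int)) (r : List Int) : List Int :=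
  ((PySem.List.enumerate arr).filter (fun p => p.2 == r)).map (·.1)

lemma repeatedRows_gen (l : List (List Int)) :
    ∀ (pref : List (List Int)) (ans : List Int),
    (l.foldl
      (fun (s : PySem.Set (List Int) × List Int × Int) i =>
        let curr := i
        if PySem.Set.contains s.1 curr then (s.1, s.2.1 ++ [s.2.2], s.2.2 + 1)
        else (PySem.Set.add s.1 curr, s.2.1, s.2.2 + 1))
      (PySem.Set.ofList pref, ans, (pref.length : Int))).2.1
      = ans ++ dupSpec l pref := by
  induction l with
  | nil => intro pref ans; simp [dupSpec]
  | cons x l ih =>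
    intro pref ans
    simp only [List.foldl_cons, dupSpec]
    by_cases hx : x ∈ pref
    · have hc : PySem.Set.contains (PySem.Set.ofList pref) x = true := by
        rw [PySem.Set.contains_iff, PySem.Set.mem_ofList]; exact hx
      rw [if_pos hx]
      simp only [hc, if_true]
      have h1 : PySem.Set.ofList pref = PySem.Set.ofList (pref ++ [x]) := by
        rw [PySem.Set.ofList_append_singleton, PySem.Set.add_of_mem]
        rw [PySem.Set.mem_ofList]; exact hx
      have h2 : ((pref.length : Nat) : Int) + 1 = (((pref ++ [x]).length : Nat) : Int) := by
        simp
      rw [h1, h2, ih (pref ++ [x])]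
      simp
    · have hc : PySem.Set.contains (PySem.Set.ofList pref) x = false := by
        rw [Bool.eq_false_iff, Ne, PySem.Set.contains_iff, PySem.Set.mem_ofList]; exact hx
      rw [if_neg hx]
      simp only [hc, if_false, Bool.false_eq_true]
      have h1 : PySem.Set.add (PySem.Set.ofList pref) x = PySem.Set.ofList (pref ++ [x]) := by
        rw [PySem.Set.ofList_append_singleton]
      have h2 : ((pref.length : Nat) : Int) + 1 = (((pref ++ [x]).length : Nat) : Int) := by
        simp
      rw [h1, h2, ih (pref ++ [x])]
      simp

-- every index recorded by dupSpec is below the total length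
lemma dupSpec_mem_lt (l : List (List Int)) :
    ∀ (pref : List (List Int)) (i : Int), i ∈ dupSpec l pref →
      i < ((pref.length + l.length : Nat) : Int) := by
  induction l with
  | nil => intro pref i h; simp [dupSpec] at h
  | cons x l ih =>
    intro pref i h
    simp only [dupSpec, List.mem_append] at h
    rcases h with h | h
    · have hi : i = ((pref.length : Nat) : Int) := by split_ifs at h <;> simp_all
      subst hi
      simp only [List.length_cons]
      push_cast; omega
    · have hb := ih (pref ++ [x]) i h
      simp only [List.length_append, List.length_cons, List.length_nil] at hb ⊢
      push_cast at hb ⊢; omega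

lemma dupSpec_append (x : List Int) (l : List (List Int)) :
    ∀ (pref : List (List Int)),
    dupSpec (l ++ [x]) pref
      = dupSpec l pref ++
        (if x ∈ pref ++ l then [((pref.length + l.length : Nat) : Int)] else []) := by
  induction l with
  | nil =>
    intro pref; simp [dupSpec]
  | cons y l ih =>
    intro pref
    have hl : (pref ++ [y]).length + l.length = pref.length + (y :: l).length := by
      simp only [List.length_append, List.length_cons, List.length_nil]; omega
    simp only [List.cons_append, dupSpec, ih (pref ++ [y]), hl, List.append_assoc,
      List.nil_append]

lemma dupSpec_pairwise (arr : List (List Int)) :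
    (dupSpec arr []).Pairwise (· < ·) := by
  induction arr using List.reverseRecOn with
  | nil => simp [dupSpec]
  | append_singleton l x ih =>
    rw [dupSpec_append]
    split_ifs with hx
    · refine List.pairwise_append.mpr ⟨ih, List.pairwise_singleton _ _, ?_⟩
      intro a ha b hb
      simp only [List.mem_singleton] at hb
      subst hb
      have := dupSpec_mem_lt l [] a ha
      simpa using this
    · simpa using ih

-- occ facts
lemma occ_append_singleton (arr : List (List Int)) (x r : List Int) :
    occ (arr ++ [x]) r
      = occ arr r ++ (if x = r then [((arr.length : Nat) : Int)] else []) := by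
  unfold occ
  rw [PySem.List.enumerate_append]
  simp only [PySem.List.enumerate_cons, PySem.List.enumerate_nil, List.filter_append,
    List.map_append]
  congr 1
  by_cases h : x = r
  · subst h; simp
  · simp [h]

lemma occ_eq_nil_of_not_mem (arr : List (List Int)) (r : List Int) (h : r ∉ arr) :
    occ arr r = [] := by
  unfold occ
  rw [List.map_eq_nil_iff, List.filter_eq_nil_iff]
  intro p hp
  rcases (PySem.List.mem_enumerate_iff _ _ _).1 hp with ⟨k, hk, rfl⟩
  simp only [beq_iff_eq]
  intro he; exact h (he ▸ List.getElem_mem hk)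

lemma occ_ne_nil_of_mem (arr : List (List Int)) (r : List Int) (h : r ∈ arr) :
    occ arr r ≠ [] := by
  unfold occ
  rw [Ne, List.map_eq_nil_iff, List.filter_eq_nil_iff]
  intro hall
  rcases List.getElem_of_mem h with ⟨k, hk, hkr⟩
  exact absurd (by simp [hkr] : ((0 + (k:Int), arr[k]) : Int × List Int).2 == r)
    (by simpa using hall _ ((PySem.List.mem_enumerate_iff _ _ _).2 ⟨k, hk, rfl⟩))

-- flatMap congruence on members
lemma flatMap_congr_mem {α β : Type} (l : List α) (f g : α → List β)
    (h : ∀ x ∈ l, f x = g x) : l.flatMap f = l.flatMap g := by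
  induction l with
  | nil => rfl
  | cons a l ih =>
    simp only [List.flatMap_cons, h a (List.mem_cons_self), ih (fun x hx => h x (List.mem_cons_of_mem a hx))]

-- bumping one group's list by one trailing element permutes to appending that element
lemma flatMap_update_perm {α β : Type} [DecidableEq α] (s : List α) (f f' : α → List β)
    (x : α) (e : β) (hnd : s.Nodup) (hx : x ∈ s)
    (hne : ∀ r ∈ s, r ≠ x → f' r = f r) (heq : f' x = f x ++ [e]) :
    (s.flatMap f').Perm (s.flatMap f ++ [e]) := by
  induction s with
  | nil => simp at hx
  | cons a s ih =>
    rcases List.nodup_cons.1 hnd with ⟨hax, hnds⟩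
    by_cases hax' : a = x
    · subst hax'
      have hrest : s.flatMap f' = s.flatMap f := by
        refine flatMap_congr_mem s f' f (fun r hr => hne r (List.mem_cons_of_mem a hr) ?_)
        rintro rfl; exact hax hr
      have hperm : ((f a ++ [e]) ++ s.flatMap f).Perm ((f a ++ s.flatMap f) ++ [e]) := by
        simp only [List.append_assoc]
        exact List.Perm.append_left _ List.perm_append_comm
      simpa [List.flatMap_cons, heq, hrest] using hperm
    · have hxs : x ∈ s := by
        rcases List.mem_cons.1 hx with h | h
        · exact absurd h.symm hax'
        · exact h
      have ha : f' a = f a := hne a List.mem_cons_self hax'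
      simp only [List.flatMap_cons, ha, List.append_assoc]
      exact List.Perm.append_left _ (ih hnds hxs (fun r hr => hne r (List.mem_cons_of_mem a hr)))

-- the flatMap form of B's collected indices
def bCore (arr : List (List Int)) : List Int :=
  (PySem.Set.ofList arr).flatMap (fun r => (occ arr r).tail)

lemma bCore_perm_dupSpec (arr : List (List Int)) :
    (bCore arr).Perm (dupSpec arr []) := by
  induction arr using List.reverseRecOn with
  | nil => simp [bCore, dupSpec]
  | append_singleton l x ih =>
    rw [dupSpec_append]
    simp only [List.length_nil, Nat.zero_add, List.nil_append]
    by_cases hx : x ∈ l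
    · have hkeys : PySem.Set.ofList (l ++ [x]) = PySem.Set.ofList l := by
        rw [PySem.Set.ofList_append_singleton, PySem.Set.add_of_mem]
        rw [PySem.Set.mem_ofList]; exact hx
      have hne : ∀ r ∈ PySem.Set.ofList l, r ≠ x →
          (occ (l ++ [x]) r).tail = (occ l r).tail := by
        intro r _ hrx
        rw [occ_append_singleton, if_neg (fun h => hrx h.symm), List.append_nil]
      have heq : (occ (l ++ [x]) x).tail = (occ l x).tail ++ [((l.length : Nat) : Int)] := by
        rw [occ_append_singleton, if_pos rfl]
        rcases List.exists_cons_of_ne_nil (occ_ne_nil_of_mem l x hx) with ⟨a, t, hat⟩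
        simp [hat]
      have hperm := flatMap_update_perm (PySem.Set.ofList l)
        (fun r => (occ l r).tail) (fun r => (occ (l ++ [x]) r).tail) x
        ((l.length : Nat) : Int) (PySem.Set.nodup_ofList l)
        ((PySem.Set.mem_ofList _ _).2 hx) hne heq
      rw [if_pos hx]
      unfold bCore
      rw [hkeys]
      exact hperm.trans (List.Perm.append ih (List.Perm.refl _))
    · have hkeys : PySem.Set.ofList (l ++ [x]) = PySem.Set.ofList l ++ [x] := by
        rw [PySem.Set.ofList_append_singleton, PySem.Set.add_of_not_mem]
        rw [PySem.Set.mem_ofList]; exact hx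
      have hlast : (occ (l ++ [x]) x).tail = [] := by
        rw [occ_append_singleton, if_pos rfl, occ_eq_nil_of_not_mem l x hx]
        simp
      have hsame : ∀ r ∈ PySem.Set.ofList l,
          (occ (l ++ [x]) r).tail = (occ l r).tail := by
        intro r hr
        have hrx : r ≠ x := fun h => hx (h ▸ (PySem.Set.mem_ofList _ _).1 hr)
        rw [occ_append_singleton, if_neg (fun h => hrx h.symm), List.append_nil]
      rw [if_neg hx, List.append_nil]
      unfold bCore
      rw [hkeys, List.flatMap_append,
        flatMap_congr_mem _ _ _ hsame]
      simpa [hlast] using ih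

-- B's dict/values pipeline computes bCore before sorting
def bGroups (arr : List (List Int)) : PySem.Dict (List Int) (List Int) :=
  (PySem.List.enumerate arr).foldl
    (fun (d : PySem.Dict (List Int) (List Int)) p => d.modify p.2 [] (· ++ [p.1]))
    PySem.Dict.empty

lemma bGroups_keys (arr : List (List Int)) : (bGroups arr).keys = PySem.Set.ofList arr := by
  unfold bGroups
  rw [PySem.Dict.keys_foldl_modify_key]
  simp [PySem.Set.update, PySem.Set.ofList_eq_foldl, PySem.List.map_snd_enumerate]

lemma bGroups_getD (arr : List (List Int)) (r : List Int) :
    (bGroups arr).getD r [] = occ arr r := by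
  have hfold : bGroups arr
      = ((PySem.List.enumerate arr).map (fun p => (p.2, p.1))).foldl
        (fun (d : PySem.Dict (List Int) (List Int)) p => d.modify p.1 [] (· ++ [p.2]))
        PySem.Dict.empty := by
    rw [List.foldl_map]
    rfl
  rw [hfold, PySem.Dict.getD_foldl_modify_append]
  unfold occ
  simp [List.filter_map, List.map_map, Function.comp_def]

lemma repeatedRows_alt_out (arr : List (List Int)) (m n : Int) :
    repeatedRows_alt arr m n = PySem.List.sorted (bCore arr) (fun x => x) false := by
  have h0 : repeatedRows_alt arr m n
      = PySem.List.sorted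
          ((bGroups arr).values.foldl
            (fun acc g => acc ++ PySem.List.slice g (some 1) none) [])
          (fun x => x) false := rfl
  rw [h0]
  have hnd : (bGroups arr).keys.Nodup := by
    rw [bGroups_keys]; exact PySem.Set.nodup_ofList arr
  have hvals : (bGroups arr).values = (PySem.Set.ofList arr).map (fun r => occ arr r) := by
    rw [PySem.Dict.values_eq_map_keys (bGroups arr) hnd [], bGroups_keys]
    exact List.map_congr_left (fun r _ => bGroups_getD arr r)
  rw [PySem.List.foldl_append_eq_flatMap, hvals]
  unfold bCore
  simp [List.flatMap_map, PySem.List.slice_from_one]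

-- ===== VERDICT (by name: the statement is the Claim_ definition above) =====
theorem repeatedRows_spec : Claim_equal_repeatedRows := by
  intro arr m n _
  show repeatedRows arr m n = repeatedRows_alt arr m n
  have hA := repeatedRows_gen arr [] []
  simp only [List.length_nil, Nat.cast_zero, List.nil_append] at hA
  unfold repeatedRows
  rw [show (PySem.Set.empty : PySem.Set (List Int)) = PySem.Set.ofList [] from rfl, hA]
  rw [repeatedRows_alt_out]
  exact (PySem.List.sorted_eq_of_perm_of_pairwise_lt (bCore arr) (dupSpec arr [])
      (fun x => x) ((bCore_perm_dupSpec arr).symm) (dupSpec_pairwise arr)).symm
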